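-- pv_equiv track=rewrite | github.com/deadshot-21/Leetcode | 3894-maximize-ysum-by-picking-a-triplet-of-distinct-xvalues/3894-maximize-ysum-by-picking-a-triplet-of-distinct-xvalues.py | maxSumDistinctTriplet
-- ===== SOURCE A (Python) =====
-- from typing import List
--
-- from collections import defaultdict
--
-- def maxSumDistinctTriplet(x: List[int], y: List[int]) -> int:
--
--     n = len(x)
--     # 1. Group y values by x values
--     # x_to_y_values: {x_val: [y_val1, y_val2, ...]}
--     x_to_y_values = defaultdict(list)
--     for i in range(n):
--         x_to_y_values[x[i]].append(y[i])
--
--     # 2. For each x value, find its maximum y value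
--     # This implicitly handles the distinct indices for the same x value,
--     # by only considering the highest y for a given x.
--     # This is correct because if we pick x[i] and x[k] where x[i] == x[k]
--     # and y[i] > y[k], we would always prefer y[i].
--
--     # candidates: [(max_y_for_x_val, x_val)]
--     candidates = []
--     for x_val, y_list in x_to_y_values.items():
--         # Get the maximum y value for the current x_val
--         candidates.append((max(y_list), x_val))
--
--     # 3. Sort candidates by y value in descending order
--     # This ensures we pick the largest y values first.
--     candidates.sort(key=lambda item: item[0], reverse=True)
--
--     # 4. Check if we have at least three distinct x values
--     # If len(candidates) < 3, it means there are fewer than 3 unique x values,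
--     # making it impossible to pick a triplet of distinct x values.
--     if len(candidates) < 3:
--         return -1
--
--     # 5. The maximum sum will be the sum of the top 3 y values from the sorted candidates.
--     # Since each candidate represents a unique x value (with its max y),
--     # picking the top 3 guarantees distinct x values.
--     max_sum = candidates[0][0] + candidates[1][0] + candidates[2][0]
--
--     return max_sum
-- ===== SOURCE B (Python) =====
-- from typing import List
--
-- def maxSumDistinctTriplet(x: List[int], y: List[int]) -> int:
--     # One pass: best y per distinct x, tracking the top-3 maxima on the fly.
--     best = {}
--     for xv, yv in zip(x, y):
--         if xv not in best or yv > best[xv]: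
--             best[xv] = yv
--     a = b = c = None
--     for v in best.values():
--         if a is None or v > a:
--             a, b, c = v, a, b
--         elif b is None or v > b:
--             b, c = v, b
--         elif c is None or v > c:
--             c = v
--     if c is None:
--         return -1
--     return a + b + c
-- ===== Notes on version B (the rewrite author's own statement) =====
-- stated objective: faster
-- what changed: Replaces grouping y-values into per-x lists, a per-group max pass and a full descending sort with a single zip pass keeping only the running max y per x and a constant-space top-3 tracker, eliminating the sort and the intermediate lists.
import Mathlib
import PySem

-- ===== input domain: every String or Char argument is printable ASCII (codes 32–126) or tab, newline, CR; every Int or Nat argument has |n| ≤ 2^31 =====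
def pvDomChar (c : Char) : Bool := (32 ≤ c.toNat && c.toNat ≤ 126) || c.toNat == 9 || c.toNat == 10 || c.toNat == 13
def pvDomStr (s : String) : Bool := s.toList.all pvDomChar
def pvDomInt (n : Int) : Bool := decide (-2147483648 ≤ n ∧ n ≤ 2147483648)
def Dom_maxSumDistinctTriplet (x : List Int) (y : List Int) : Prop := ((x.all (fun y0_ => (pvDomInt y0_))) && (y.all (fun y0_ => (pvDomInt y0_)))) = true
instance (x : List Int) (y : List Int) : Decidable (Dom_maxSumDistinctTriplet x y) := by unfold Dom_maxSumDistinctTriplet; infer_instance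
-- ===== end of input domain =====

-- B replaces A's group-into-lists + per-group max + descending sort by a single zip pass
-- keeping the running max y per x and a constant-space top-3 tracker (objective: faster).

-- ===== PORT A =====
-- Python: max(y_list) on a list that is nonempty by construction; ported as max? with a
-- default that is never used on a nonempty list, exact wherever Python's max returns.
def maxSumDistinctTriplet (x : List Int) (y : List Int) : Int :=
  let n : Int := x.length
  let d := (PySem.List.pyRange 0 n 1).foldl
      (fun d i => d.modify (PySem.List.pyGetD x i 0) [] (fun l => l ++ [PySem.List.pyGetD y i 0]))
      PySem.Dict.empty
  let candidates := d.items.map (fun p => ((PySem.List.max? p.2 (fun v => v)).getD 0, p.1))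
  let cands := PySem.List.sorted candidates (fun p => p.1) true
  if cands.length < 3 then -1
  else (PySem.List.pyGetD cands 0 (0, 0)).1 + (PySem.List.pyGetD cands 1 (0, 0)).1 +
       (PySem.List.pyGetD cands 2 (0, 0)).1

-- ===== PORT B =====
-- one step of Source B's top-3 tracker: the if/elif/elif chain on (a, b, c)
def pyTop3Step (s : Option Int × Option Int × Option Int) (v : Int) :
    Option Int × Option Int × Option Int :=
  match s with
  | (a, b, c) =>
    if (match a with | none => true | some av => decide (av < v)) then (some v, a, b)
    else if (match b with | none => true | some bv => decide (bv < v)) then (a, some v, b)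
    else if (match c with | none => true | some cv => decide (cv < v)) then (a, b, some v)
    else (a, b, c)

-- Source B: best[xv] looked up only when xv ∈ best, so the total getD is exact;
-- when c is some, a and b are some too, so the catch-all of the match is Python's 'c is None' case.
def maxSumDistinctTriplet_alt (x : List Int) (y : List Int) : Int :=
  let best := (x.zip y).foldl
      (fun d p => if !(d.contains p.1) || decide (d.getD p.1 0 < p.2) then d.insert p.1 p.2 else d)
      PySem.Dict.empty
  match best.values.foldl pyTop3Step (none, none, none) with
  | (some a, some b, some c) => a + b + c
  | _ => -1

-- ===== PRECONDITION & SPEC =====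
-- Pre_ excludes exactly the inputs where A raises IndexError (y shorter than x: A reads y[i] for i < len(x)).
def Pre_maxSumDistinctTriplet (x : List Int) (y : List Int) : Prop := x.length ≤ y.length
instance (x : List Int) (y : List Int) : Decidable (Pre_maxSumDistinctTriplet x y) := by unfold Pre_maxSumDistinctTriplet; infer_instance
def pvWitness_maxSumDistinctTriplet : List Int × List Int := ([1, 2, 3], [4, 5, 6])

def Spec_maxSumDistinctTriplet (x : List Int) (y : List Int) (out : Int) : Prop := out = maxSumDistinctTriplet_alt x y
instance (x : List Int) (y : List Int) (out : Int) : Decidable (Spec_maxSumDistinctTriplet x y out) := by unfold Spec_maxSumDistinctTriplet; infer_instance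

-- ===== CLAIM (what is proved, stated in full; the proofs are below) =====
def Claim_equal_maxSumDistinctTriplet : Prop := ∀ (x : List Int) (y : List Int), Dom_maxSumDistinctTriplet x y → Pre_maxSumDistinctTriplet x y → Spec_maxSumDistinctTriplet x y (maxSumDistinctTriplet x y)

-- ===== LEMMAS AND PROOFS =====

-- index loop over range(len x) = loop over zip x y (both lists long enough)
theorem pv_foldl_pyRange_getD_zip {σ : Type} (g : σ → Int → Int → σ) (n : Nat) :
    ∀ (x y : List Int) (s : σ), n ≤ x.length → n ≤ y.length →
    (PySem.List.pyRange 0 (n : Int) 1).foldl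
      (fun s i => g s (PySem.List.pyGetD x i 0) (PySem.List.pyGetD y i 0)) s
    = ((x.take n).zip (y.take n)).foldl (fun s p => g s p.1 p.2) s := by
  induction n with
  | zero => intro x y s _ _; simp [PySem.List.pyRange]
  | succ m ih =>
    intro x y s hx hy
    have hmx : m < x.length := by omega
    have hmy : m < y.length := by omega
    have hsplit : PySem.List.pyRange 0 ((m + 1 : Nat) : Int) 1
        = PySem.List.pyRange 0 (m : Int) 1 ++ [(m : Int)] := by
      rw [PySem.List.pyRange_one_append 0 (m : Int) ((m + 1 : Nat) : Int)
        (by positivity) (by push_cast; omega)]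
      congr 1
      rw [PySem.List.pyRange_one_cons (by push_cast; omega)]
      have : ((m + 1 : Nat) : Int) = (m : Int) + 1 := by push_cast; ring
      rw [this]
      simp [PySem.List.pyRange]
    have hxt : x.take (m + 1) = x.take m ++ [x[m]] := by
      rw [List.take_add_one, List.getElem?_eq_getElem hmx]; rfl
    have hyt : y.take (m + 1) = y.take m ++ [y[m]] := by
      rw [List.take_add_one, List.getElem?_eq_getElem hmy]; rfl
    rw [hsplit, List.foldl_append, hxt, hyt,
      List.zip_append (by simp [List.length_take]; omega), List.foldl_append,
      ih x y s (by omega) (by omega)]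
    simp only [List.zip_cons_cons, List.zip_nil_right, List.foldl_cons, List.foldl_nil]
    rw [PySem.List.pyGetD_ofNat x m 0 hmx, PySem.List.pyGetD_ofNat y m 0 hmy]

theorem pv_zip_take_right (x : List Int) : ∀ (y : List Int), x.length ≤ y.length →
    x.zip (y.take x.length) = x.zip y := by
  induction x with
  | nil => intro y h; simp
  | cons a t ih =>
    intro y h
    cases y with
    | nil => simp at h
    | cons b u => simpa using ih u (by simpa using h)

-- A's grouping dict and B's running-max dict have the same keys list
theorem pv_keys_eq (ps : List (Int × Int)) :
    ∀ (dA : PySem.Dict Int (List Int)) (dB : PySem.Dict Int Int), dA.keys = dB.keys →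
    (ps.foldl (fun d p => d.modify p.1 [] (fun l => l ++ [p.2])) dA).keys
    = (ps.foldl (fun d p => if !(d.contains p.1) || decide (d.getD p.1 0 < p.2) then d.insert p.1 p.2 else d) dB).keys := by
  induction ps with
  | nil => intro dA dB h; simpa using h
  | cons p t ih =>
    intro dA dB h
    simp only [List.foldl_cons]
    apply ih
    have hc : dA.contains p.1 = dB.contains p.1 := by
      rw [PySem.Dict.contains_eq_decide_mem_keys, PySem.Dict.contains_eq_decide_mem_keys, h]
    rw [PySem.Dict.keys_modify]
    by_cases hb : dB.contains p.1 = true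
    · have ha : dA.contains p.1 = true := by rw [hc]; exact hb
      rw [PySem.Dict.keys_insert_of_contains _ _ ha]
      split_ifs with hcond
      · rw [PySem.Dict.keys_insert_of_contains _ _ hb]; exact h
      · exact h
    · have hb' : dB.contains p.1 = false := by simpa using hb
      have ha : dA.contains p.1 = false := by rw [hc]; exact hb'
      rw [PySem.Dict.keys_insert_of_not_contains _ _ ha]
      rw [if_pos (by simp [hb'])]
      rw [PySem.Dict.keys_insert_of_not_contains _ _ hb', h]

-- characterisation of B's running-max dict
def pvRunMax (o : Option Int) (vs : List Int) : Option Int :=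
  match o, vs with
  | none, [] => none
  | none, v :: t => some (t.foldl max v)
  | some w, t => some (t.foldl max w)

theorem pv_getB_char (ps : List (Int × Int)) :
    ∀ (d : PySem.Dict Int Int) (k : Int),
    (ps.foldl (fun d p => if !(d.contains p.1) || decide (d.getD p.1 0 < p.2) then d.insert p.1 p.2 else d) d).get? k
    = pvRunMax (d.get? k) ((ps.filter (fun p => p.1 == k)).map (·.2)) := by
  induction ps with
  | nil => intro d k; cases h : d.get? k <;> simp [pvRunMax, h]
  | cons p t ih =>
    intro d k
    simp only [List.foldl_cons, List.filter_cons]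
    by_cases hk : p.1 = k
    · subst hk
      simp only [BEq.rfl, if_pos, List.map_cons]
      by_cases hcont : d.contains p.1 = true
      · obtain ⟨w, hw⟩ : ∃ w, d.get? p.1 = some w := by
          cases hgw : d.get? p.1 with
          | none =>
            rw [PySem.Dict.get?_eq_none_iff_contains] at hgw
            rw [hgw] at hcont; exact absurd hcont (by simp)
          | some w => exact ⟨w, rfl⟩
        have hgd : d.getD p.1 0 = w := by rw [PySem.Dict.getD_eq_get?_getD, hw]; rfl
        by_cases hlt : w < p.2
        · rw [if_pos (by simp [hcont, hgd, hlt])]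
          rw [ih, PySem.Dict.get?_insert, if_pos rfl, hw]
          simp [pvRunMax, max_eq_right (le_of_lt hlt)]
        · rw [if_neg (by simp [hcont, hgd, hlt])]
          rw [ih, hw]
          simp [pvRunMax, max_eq_left (not_lt.mp hlt)]
      · have hcont' : d.contains p.1 = false := by simpa using hcont
        have hnone : d.get? p.1 = none := (PySem.Dict.get?_eq_none_iff_contains d p.1).2 hcont'
        rw [if_pos (by simp [hcont'])]
        rw [ih, PySem.Dict.get?_insert, if_pos rfl, hnone]
        simp [pvRunMax]
    · have hbk : (p.1 == k) = false := by simpa using hk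
      simp only [hbk, Bool.false_eq_true, ite_false]
      split_ifs with hcond
      · rw [ih, PySem.Dict.get?_insert, if_neg (fun h => hk h.symm)]
      · rw [ih]

-- the first ≤ 3 entries of a list, as Source B's (a, b, c) option state
def pvEnc3 (l : List Int) : Option Int × Option Int × Option Int :=
  match l with
  | [] => (none, none, none)
  | [a] => (some a, none, none)
  | [a, b] => (some a, some b, none)
  | a :: b :: c :: _ => (some a, some b, some c)

theorem pv_step_insertBy (s : List Int) (v : Int) :
    pvEnc3 (PySem.List.insertBy (fun a b => decide ((fun w : Int => w) b < (fun w : Int => w) a)) v s)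
    = pyTop3Step (pvEnc3 s) v := by
  cases s with
  | nil => simp [PySem.List.insertBy, pvEnc3, pyTop3Step]
  | cons a s =>
    cases s with
    | nil =>
      by_cases h1 : a < v <;>
        simp [PySem.List.insertBy, pvEnc3, pyTop3Step, h1]
    | cons b s =>
      cases s with
      | nil =>
        by_cases h1 : a < v <;> by_cases h2 : b < v <;>
          simp [PySem.List.insertBy, pvEnc3, pyTop3Step, h1, h2]
      | cons c t =>
        by_cases h1 : a < v <;> by_cases h2 : b < v <;> by_cases h3 : c < v <;>
          simp [PySem.List.insertBy, pvEnc3, pyTop3Step, h1, h2, h3]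

theorem pv_top3_eq_enc3_dsort (l : List Int) :
    l.foldl pyTop3Step (none, none, none) = pvEnc3 (PySem.List.sorted l (fun v => v) true) := by
  rw [PySem.List.sorted_rev_eq_foldl_insertBy]
  have inv : ∀ (t : List Int) (s : List Int),
      t.foldl pyTop3Step (pvEnc3 s)
      = pvEnc3 (t.foldl (fun acc w =>
          PySem.List.insertBy (fun a b => decide ((fun v : Int => v) b < (fun v : Int => v) a)) w acc) s) := by
    intro t
    induction t with
    | nil => intro s; rfl
    | cons v t iht =>
      intro s
      simp only [List.foldl_cons]
      rw [← pv_step_insertBy, iht]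
  have := inv l []
  simpa [pvEnc3] using this

-- ===== VERDICT (by name: the statement is the Claim_ definition above) =====
theorem maxSumDistinctTriplet_spec : Claim_equal_maxSumDistinctTriplet := by
  intro x y _ hpre
  unfold Spec_maxSumDistinctTriplet
  unfold Pre_maxSumDistinctTriplet at hpre
  have h0 : (PySem.List.pyRange 0 ((x.length : Int)) 1).foldl
      (fun d i => d.modify (PySem.List.pyGetD x i 0) [] (fun l => l ++ [PySem.List.pyGetD y i 0]))
      PySem.Dict.empty
      = (x.zip y).foldl (fun d p => d.modify p.1 [] (fun l => l ++ [p.2])) PySem.Dict.empty := by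
    have h1 := pv_foldl_pyRange_getD_zip (σ := PySem.Dict Int (List Int))
      (fun d a b => d.modify a [] (fun l => l ++ [b])) x.length x y PySem.Dict.empty le_rfl hpre
    rw [List.take_length, pv_zip_take_right x y hpre] at h1
    exact h1
  simp only [maxSumDistinctTriplet, maxSumDistinctTriplet_alt]
  rw [h0]
  set dA := (x.zip y).foldl (fun d p => d.modify p.1 [] (fun l => l ++ [p.2])) PySem.Dict.empty with hdA
  set dB := (x.zip y).foldl
      (fun d p => if !(d.contains p.1) || decide (d.getD p.1 0 < p.2) then d.insert p.1 p.2 else d)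
      PySem.Dict.empty with hdB
  have hkeys : dA.keys = dB.keys := by
    have := pv_keys_eq (x.zip y) PySem.Dict.empty PySem.Dict.empty
      (by rw [PySem.Dict.keys_empty, PySem.Dict.keys_empty])
    rw [← hdA, ← hdB] at this
    exact this
  have hnodA : dA.keys.Nodup := by
    have := PySem.Dict.nodup_keys_foldl_modify_key (x.zip y) (fun p => p.1) []
      (fun _ p => fun l => l ++ [p.2]) PySem.Dict.empty (by simp [PySem.Dict.keys_empty])
    exact this
  have hnodB : dB.keys.Nodup := hkeys ▸ hnodA
  have hAv : ∀ k, dA.getD k [] = ((x.zip y).filter (fun p => p.1 == k)).map (·.2) := by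
    intro k
    have := PySem.Dict.getD_foldl_modify_append (x.zip y) PySem.Dict.empty k
    rw [← hdA] at this
    simpa [PySem.Dict.getD_empty] using this
  have hBv : ∀ k, dB.get? k = pvRunMax none (((x.zip y).filter (fun p => p.1 == k)).map (·.2)) := by
    intro k
    have := pv_getB_char (x.zip y) PySem.Dict.empty k
    rw [← hdB, PySem.Dict.get?_empty] at this
    exact this
  have hpoint : ∀ k ∈ dB.keys,
      (PySem.List.max? (dA.getD k []) (fun v => v)).getD 0 = dB.getD k 0 := by
    intro k hkmem
    have hcont : dB.contains k = true := by
      rw [PySem.Dict.contains_eq_decide_mem_keys]; simpa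
    have hne : dB.get? k ≠ none := by
      rw [Ne, PySem.Dict.get?_eq_none_iff_contains]; simp [hcont]
    rcases hfil : ((x.zip y).filter (fun p => p.1 == k)).map (·.2) with _ | ⟨v, t⟩
    · exact absurd (by rw [hBv k, hfil]; rfl) hne
    · rw [hAv k, hfil, PySem.List.max?_id_cons,
        PySem.Dict.getD_eq_get?_getD, hBv k, hfil]
      rfl
  have hitems : dA.items = dA.keys.map (fun k => (k, dA.getD k [])) :=
    PySem.Dict.items_eq_map_keys dA hnodA []
  have hvals : dB.values = dB.keys.map (fun k => dB.getD k 0) :=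
    PySem.Dict.values_eq_map_keys dB hnodB 0
  have hcf : ((dA.items.map (fun p => ((PySem.List.max? p.2 (fun v => v)).getD 0, p.1))).map
      (fun p => p.1)) = dB.values := by
    rw [hitems, hvals, ← hkeys, List.map_map, List.map_map]
    apply List.map_congr_left
    intro k hk
    simp only [Function.comp]
    exact hpoint k (hkeys ▸ hk)
  set cands := dA.items.map (fun p => ((PySem.List.max? p.2 (fun v => v)).getD 0, p.1)) with hcands
  set S := PySem.List.sorted cands (fun p => p.1) true with hS
  have hsmf : S.map (fun p => p.1) = PySem.List.sorted dB.values (fun v => v) true := by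
    apply List.Perm.eq_of_pairwise (le := fun a b : Int => b ≤ a)
    · intro a b _ _ h1 h2; exact le_antisymm h2 h1
    · exact List.pairwise_map.mpr (PySem.List.sorted_pairwise_rev cands (fun p => p.1))
    · exact PySem.List.sorted_pairwise_rev dB.values (fun v => v)
    · have p1 : (S.map (fun p => p.1)).Perm (cands.map (fun p => p.1)) :=
        (PySem.List.sorted_perm cands (fun p => p.1) true).map (fun p => p.1)
      rw [hcf] at p1
      exact p1.trans (PySem.List.sorted_perm dB.values (fun v => v) true).symm
  rw [pv_top3_eq_enc3_dsort, ← hsmf]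
  clear_value S
  clear hS
  rcases S with _ | ⟨p0, S1⟩
  · simp [pvEnc3]
  rcases S1 with _ | ⟨p1, S2⟩
  · simp [pvEnc3]
  rcases S2 with _ | ⟨p2, S3⟩
  · simp [pvEnc3]
  · have g0 : PySem.List.pyGetD (p0 :: p1 :: p2 :: S3) 0 (0, 0) = p0 :=
      PySem.List.pyGetD_zero_cons p0 (p1 :: p2 :: S3) (0, 0)
    have g1 : PySem.List.pyGetD (p0 :: p1 :: p2 :: S3) 1 (0, 0) = p1 := by
      have := PySem.List.pyGetD_ofNat (p0 :: p1 :: p2 :: S3) 1 (0, 0) (by simp)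
      simpa using this
    have g2 : PySem.List.pyGetD (p0 :: p1 :: p2 :: S3) 2 (0, 0) = p2 := by
      have := PySem.List.pyGetD_ofNat (p0 :: p1 :: p2 :: S3) 2 (0, 0) (by simp)
      simpa using this
    rw [if_neg (by simp), g0, g1, g2]
    simp [pvEnc3]
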